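-- pv_equiv track=rewrite | github.com/RamananVr/Leetcodepython | hashing_strings/0890_unknown_title.py | findAndReplacePattern
-- ===== SOURCE A (Python) =====
-- def findAndReplacePattern(words, pattern):
--     def encode(s):
--         """
--         Encodes a string into a pattern based on the order of first occurrences of characters.
--         Example: "abb" -> [0, 1, 1], "mee" -> [0, 1, 1]
--         """
--         mapping = {}
--         encoded = []
--         for i, char in enumerate(s):
--             if char not in mapping:
--                 mapping[char] = len(mapping)
--             encoded.append(mapping[char])
--         return tuple(encoded)
--
--     # Encode the pattern
--     pattern_encoded = encode(pattern)
--
--     # Filter words that match the encoded pattern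
--     return [word for word in words if encode(word) == pattern_encoded]
-- ===== SOURCE B (Python) =====
-- def findAndReplacePattern(words, pattern):
--     def matches(word):
--         if len(word) != len(pattern):
--             return False
--         fwd = {}
--         bwd = {}
--         for pc, wc in zip(pattern, word):
--             if pc in fwd:
--                 if fwd[pc] != wc:
--                     return False
--             else:
--                 if wc in bwd:
--                     return False
--                 fwd[pc] = wc
--                 bwd[wc] = pc
--         return True
--     return [word for word in words if matches(word)]
-- ===== Notes on version B (the rewrite author's own statement) =====
-- stated objective: alternative
-- what changed: A canonically rank-encodes the pattern and every word and compares the encoded tuples; B instead checks each word directly against the pattern with a single parallel scan maintaining forward and backward character-mapping dictionaries and failing on the first inconsistency.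
import Mathlib
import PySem

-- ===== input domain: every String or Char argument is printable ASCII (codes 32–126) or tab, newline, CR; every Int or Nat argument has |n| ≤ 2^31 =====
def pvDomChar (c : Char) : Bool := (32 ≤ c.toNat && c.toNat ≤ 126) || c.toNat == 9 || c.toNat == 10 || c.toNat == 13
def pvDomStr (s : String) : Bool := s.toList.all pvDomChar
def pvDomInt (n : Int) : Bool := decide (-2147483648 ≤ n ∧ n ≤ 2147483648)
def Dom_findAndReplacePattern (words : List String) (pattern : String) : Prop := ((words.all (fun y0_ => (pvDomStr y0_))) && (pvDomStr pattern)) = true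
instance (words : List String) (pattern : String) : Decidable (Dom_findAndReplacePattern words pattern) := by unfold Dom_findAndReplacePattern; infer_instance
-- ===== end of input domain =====

-- B replaces A's canonical rank-encoding of every word (encode, then compare tuples) by a
-- direct two-dictionary bijection scan over each (pattern-char, word-char) pair: an
-- alternative algorithm of the same cost.


-- ===== PORT A =====
-- loop body of A's inner `encode`; `mapping[char]` always hits a present key there, so getD's default is never used
def pvEncStep (st : PySem.Dict Char Int × List Int) (c : Char) : PySem.Dict Char Int × List Int :=
  let m := if st.1.contains c then st.1 else st.1.insert c (st.1.size : Int)
  (m, st.2 ++ [m.getD c 0])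

def pvEncode (s : List Char) : List Int :=
  (s.foldl pvEncStep ((PySem.Dict.empty : PySem.Dict Char Int), ([] : List Int))).2

def findAndReplacePattern (words : List String) (pattern : String) : List String :=
  let patternEncoded := pvEncode pattern.toList
  words.filter (fun word => pvEncode word.toList == patternEncoded)

-- ===== PORT B =====
def pvMatchLoop (fwd bwd : PySem.Dict Char Char) : List (Char × Char) → Bool
  | [] => true
  | (pc, wc) :: rest =>
    match fwd.get? pc with
    | some v => if v != wc then false else pvMatchLoop fwd bwd rest
    | none =>
      if bwd.contains wc then false
      else pvMatchLoop (fwd.insert pc wc) (bwd.insert wc pc) rest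

def pvMatches (word pattern : List Char) : Bool :=
  if word.length ≠ pattern.length then false
  else pvMatchLoop PySem.Dict.empty PySem.Dict.empty (pattern.zip word)

def findAndReplacePattern_alt (words : List String) (pattern : String) : List String :=
  words.filter (fun word => pvMatches word.toList pattern.toList)

-- ===== PRECONDITION & SPEC =====
def Spec_findAndReplacePattern (words : List String) (pattern : String) (out : List String) : Prop := out = findAndReplacePattern_alt words pattern
instance (words : List String) (pattern : String) (out : List String) : Decidable (Spec_findAndReplacePattern words pattern out) := by unfold Spec_findAndReplacePattern; infer_instance

-- ===== CLAIM (what is proved, stated in full; the proofs are below) =====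
def Claim_equal_findAndReplacePattern : Prop := ∀ (words : List String) (pattern : String), Dom_findAndReplacePattern words pattern → Spec_findAndReplacePattern words pattern (findAndReplacePattern words pattern)

-- ===== LEMMAS AND PROOFS =====

-- invariant tying A's two rank dicts (mp for the pattern, mw for the word) to B's
-- forward/backward dicts after both have processed the same prefix of character pairs
def pvInv (k : Int) (mp mw : PySem.Dict Char Int) (fwd bwd : PySem.Dict Char Char) : Prop :=
  (∀ pc wc, fwd.get? pc = some wc → ∃ r, mp.get? pc = some r ∧ mw.get? wc = some r) ∧
  (∀ pc, fwd.get? pc = none → mp.get? pc = none) ∧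
  (∀ wc, bwd.contains wc = (mw.get? wc).isSome) ∧
  ((mp.size : Int) = k ∧ (mw.size : Int) = k) ∧
  (∀ c r, mw.get? c = some r → 0 ≤ r ∧ r < k) ∧
  (∀ c c' r, mw.get? c = some r → mw.get? c' = some r → c = c')

theorem encStep_mem (m : PySem.Dict Char Int) (e : List Int) (c : Char) (r : Int)
    (h : m.get? c = some r) : pvEncStep (m, e) c = (m, e ++ [r]) := by
  have hc : m.contains c = true := by rw [PySem.Dict.contains_eq_isSome_get?, h]; rfl
  have hg : m.getD c 0 = r := by rw [PySem.Dict.getD_eq_get?_getD, h]; rfl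
  simp [pvEncStep, hc, hg]
theorem encStep_new (m : PySem.Dict Char Int) (e : List Int) (c : Char)
    (h : m.get? c = none) :
    pvEncStep (m, e) c = (m.insert c (m.size : Int), e ++ [(m.size : Int)]) := by
  have hc : m.contains c = false := by rw [PySem.Dict.contains_eq_isSome_get?, h]; rfl
  simp [pvEncStep, hc, PySem.Dict.getD_insert_self]
theorem encFold_acc (l : List Char) : ∀ (m : PySem.Dict Char Int) (e : List Int),
    l.foldl pvEncStep (m, e) = ((l.foldl pvEncStep (m, [])).1, e ++ (l.foldl pvEncStep (m, [])).2) := by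
  induction l with
  | nil => simp
  | cons c l ih =>
    intro m e
    simp only [List.foldl_cons]
    have hstep : ∀ e' : List Int, pvEncStep (m, e') c =
        ((pvEncStep (m, []) c).1, e' ++ (pvEncStep (m, []) c).2) := by
      intro e'; simp [pvEncStep]
    rw [hstep e, hstep []]
    simp only [List.nil_append]
    rw [ih (pvEncStep (m, []) c).1 (e ++ (pvEncStep (m, []) c).2),
       ih (pvEncStep (m, []) c).1 (pvEncStep (m, []) c).2]
    simp

theorem pvDiffer (P W : List Char) (mp mw : PySem.Dict Char Int) (ep ew : List Int) (vp vw : Int)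
    (hlen : ep.length = ew.length) (hne : vp ≠ vw) :
    ¬ ((P.foldl pvEncStep (mp, ep ++ [vp])).2 = (W.foldl pvEncStep (mw, ew ++ [vw])).2) := by
  intro h
  rw [encFold_acc P mp (ep ++ [vp]), encFold_acc W mw (ew ++ [vw])] at h
  simp only [List.append_assoc] at h
  obtain ⟨-, h2⟩ := List.append_inj h hlen
  exact hne (by simpa using congrArg (fun l => l.headD 0) h2)

theorem pvMain (l : List (Char × Char)) : ∀ (k : Int) (mp mw : PySem.Dict Char Int)
    (fwd bwd : PySem.Dict Char Char) (ep ew : List Int),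
    pvInv k mp mw fwd bwd → ep.length = ew.length →
    ((((l.map Prod.fst).foldl pvEncStep (mp, ep)).2 = ((l.map Prod.snd).foldl pvEncStep (mw, ew)).2)
      ↔ (ep = ew ∧ pvMatchLoop fwd bwd l = true)) := by
  induction l with
  | nil =>
    intro k mp mw fwd bwd ep ew hinv hlen
    simp [pvMatchLoop]
  | cons pr l ih =>
    obtain ⟨pc, wc⟩ := pr
    intro k mp mw fwd bwd ep ew hinv hlen
    obtain ⟨h1, h2, h3, ⟨hszp, hszw⟩, h5, h6⟩ := hinv
    simp only [List.map_cons, List.foldl_cons]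
    cases hf : fwd.get? pc with
    | some v =>
      obtain ⟨r, hmp, hmwv⟩ := h1 pc v hf
      rw [encStep_mem mp ep pc r hmp]
      by_cases hveq : v = wc
      · subst hveq
        rw [encStep_mem mw ew v r hmwv]
        rw [ih k mp mw fwd bwd _ _ ⟨h1, h2, h3, ⟨hszp, hszw⟩, h5, h6⟩ (by simp [hlen])]
        simp [pvMatchLoop, hf]
      · -- v ≠ wc : B fails, appended ranks differ
        cases hmw : mw.get? wc with
        | some r' =>
          rw [encStep_mem mw ew wc r' hmw]
          have hrr : r ≠ r' := fun he => hveq (h6 v wc r hmwv (he ▸ hmw))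
          simp only [pvMatchLoop, hf, bne_iff_ne, ne_eq, hveq, not_false_eq_true, if_true,
            Bool.false_eq_true, and_false, iff_false]
          exact fun h => pvDiffer _ _ _ _ _ _ _ _ hlen hrr h
        | none =>
          rw [encStep_new mw ew wc hmw]
          have hlt : r < k := (h5 v r hmwv).2
          have hrk : r ≠ (mw.size : Int) := by rw [hszw]; omega
          simp only [pvMatchLoop, hf, bne_iff_ne, ne_eq, hveq, not_false_eq_true, if_true,
            Bool.false_eq_true, and_false, iff_false]
          exact fun h => pvDiffer _ _ _ _ _ _ _ _ hlen hrk h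
    | none =>
      have hmp : mp.get? pc = none := h2 pc hf
      rw [encStep_new mp ep pc hmp]
      cases hbw : bwd.contains wc with
      | true =>
        have hs : (mw.get? wc).isSome := by rw [← h3]; exact hbw
        obtain ⟨r', hmw⟩ := Option.isSome_iff_exists.mp hs
        rw [encStep_mem mw ew wc r' hmw]
        have hlt : r' < k := (h5 wc r' hmw).2
        have hne : (mp.size : Int) ≠ r' := by rw [hszp]; omega
        simp only [pvMatchLoop, hf, hbw, if_true, Bool.false_eq_true, and_false, iff_false]
        exact fun h => pvDiffer _ _ _ _ _ _ _ _ hlen hne h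
      | false =>
        have hmw : mw.get? wc = none := by
          have := h3 wc; rw [hbw] at this
          cases h' : mw.get? wc with
          | none => rfl
          | some r' => rw [h'] at this; simp at this
        rw [encStep_new mw ew wc hmw]
        have hk0 : (0:Int) ≤ k := hszp ▸ Int.natCast_nonneg _
        have hinv' : pvInv (k + 1) (mp.insert pc (mp.size : Int)) (mw.insert wc (mw.size : Int))
            (fwd.insert pc wc) (bwd.insert wc pc) := by
          refine ⟨?_, ?_, ?_, ⟨?_, ?_⟩, ?_, ?_⟩
          · intro pc' wc' hg
            rw [PySem.Dict.get?_insert] at hg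
            by_cases hpe : pc' = pc
            · subst hpe
              simp at hg; subst hg
              exact ⟨k, by rw [PySem.Dict.get?_insert_self, hszp],
                        by rw [PySem.Dict.get?_insert_self, hszw]⟩
            · rw [if_neg hpe] at hg
              obtain ⟨r, hr1, hr2⟩ := h1 pc' wc' hg
              have hwne : wc' ≠ wc := fun he => by rw [he, hmw] at hr2; simp at hr2
              exact ⟨r, by rw [PySem.Dict.get?_insert_of_ne _ _ hpe]; exact hr1,
                        by rw [PySem.Dict.get?_insert_of_ne _ _ hwne]; exact hr2⟩
          · intro pc' hg
            rw [PySem.Dict.get?_insert] at hg ⊢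
            by_cases hpe : pc' = pc
            · rw [if_pos hpe] at hg; simp at hg
            · rw [if_neg hpe] at hg ⊢; exact h2 pc' hg
          · intro wc'
            rw [PySem.Dict.contains_insert, PySem.Dict.get?_insert]
            by_cases hwe : wc' = wc
            · simp [hwe]
            · simp [hwe, h3 wc']
          · rw [PySem.Dict.size_insert]
            have : mp.contains pc = false := by rw [PySem.Dict.contains_eq_isSome_get?, hmp]; rfl
            rw [this]; push_cast; omega
          · rw [PySem.Dict.size_insert]
            have : mw.contains wc = false := by rw [PySem.Dict.contains_eq_isSome_get?, hmw]; rfl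
            rw [this]; push_cast; omega
          · intro c r hg
            rw [PySem.Dict.get?_insert] at hg
            by_cases hce : c = wc
            · rw [if_pos hce] at hg
              have : r = (mw.size : Int) := by simpa using hg.symm
              rw [this, hszw]; omega
            · rw [if_neg hce] at hg
              have := h5 c r hg; omega
          · intro c c' r hg hg'
            rw [PySem.Dict.get?_insert] at hg hg'
            by_cases hce : c = wc <;> by_cases hce' : c' = wc
            · rw [hce, hce']
            · rw [if_pos hce] at hg; rw [if_neg hce'] at hg'
              have hr : r = (mw.size : Int) := by simpa using hg.symm
              have := h5 c' r hg'; rw [hr, hszw] at this; omega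
            · rw [if_neg hce] at hg; rw [if_pos hce'] at hg'
              have hr : r = (mw.size : Int) := by simpa using hg'.symm
              have := h5 c r hg; rw [hr, hszw] at this; omega
            · rw [if_neg hce] at hg; rw [if_neg hce'] at hg'
              exact h6 c c' r hg hg'
        rw [ih (k + 1) _ _ _ _ _ _ hinv' (by simp [hlen])]
        have hval : (mp.size : Int) = (mw.size : Int) := by rw [hszp, hszw]
        rw [hval]
        simp [pvMatchLoop, hf, hbw]

theorem encFold_len (l : List Char) : ∀ (m : PySem.Dict Char Int),
    (l.foldl pvEncStep (m, [])).2.length = l.length := by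
  induction l with
  | nil => simp
  | cons c l ih =>
    intro m
    simp only [List.foldl_cons]
    rw [encFold_acc l (pvEncStep (m, []) c).1 (pvEncStep (m, []) c).2]
    have h1 : (pvEncStep (m, []) c).2.length = 1 := by simp [pvEncStep]
    simp [h1, ih]
    omega

theorem pvMatches_eq (w p : List Char) : (pvEncode w == pvEncode p) = pvMatches w p := by
  unfold pvMatches
  by_cases hl : w.length = p.length
  · rw [if_neg (by simp [hl])]
    have hfst : (p.zip w).map Prod.fst = p := List.map_fst_zip (by omega)
    have hsnd : (p.zip w).map Prod.snd = w := List.map_snd_zip (by omega)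
    have hinv0 : pvInv 0 PySem.Dict.empty PySem.Dict.empty PySem.Dict.empty PySem.Dict.empty := by
      refine ⟨?_, ?_, ?_, ⟨?_, ?_⟩, ?_, ?_⟩ <;>
        simp [PySem.Dict.get?_empty, PySem.Dict.contains_empty, PySem.Dict.size_empty]
    have hmain := pvMain (p.zip w) 0 PySem.Dict.empty PySem.Dict.empty PySem.Dict.empty
      PySem.Dict.empty [] [] hinv0 rfl
    rw [hfst, hsnd] at hmain
    simp only [true_and] at hmain
    cases hres : pvMatchLoop PySem.Dict.empty PySem.Dict.empty (p.zip w) with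
    | true =>
      have : pvEncode w = pvEncode p := by
        unfold pvEncode; exact (hmain.mpr (by simp [hres])).symm
      simp [this]
    | false =>
      have : ¬ pvEncode w = pvEncode p := by
        unfold pvEncode
        intro he
        have := hmain.mp he.symm
        rw [hres] at this; simp at this
      simp [this]
  · rw [if_pos hl]
    have hne : ¬ pvEncode w = pvEncode p := by
      intro he
      have := congrArg List.length he
      unfold pvEncode at this
      rw [encFold_len, encFold_len] at this
      exact hl this
    simp [hne]

-- ===== VERDICT (by name: the statement is the Claim_ definition above) =====
theorem findAndReplacePattern_spec : Claim_equal_findAndReplacePattern := by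
  intro words pattern _
  unfold Spec_findAndReplacePattern findAndReplacePattern findAndReplacePattern_alt
  exact List.filter_congr (fun w _ => pvMatches_eq w.toList pattern.toList)
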